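-- pv_equiv track=rewrite | github.com/SaiChandraCh/IB | src/week_1/day_3/assignment/4_move_zeroes_to_end.py | solve
-- ===== SOURCE A (Python) =====
-- def solve(A):
--     length = len(A)
--     i = 0
--     count = 0
--     while i<length:
--         if A[i] == 0:
--             A.pop(i)
--             i-=1
--             length -= 1
--             count += 1
--         i += 1
--
--     for i in range(count):
--         A.append(0)
--     return A
-- ===== SOURCE B (Python) =====
-- def solve(A):
--     nz = [x for x in A if x != 0]
--     nz.extend([0] * (len(A) - len(nz)))
--     A[:] = nz
--     return A
-- ===== Notes on version B (the rewrite author's own statement) =====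
-- stated objective: simpler
-- what changed: Replaces the while-loop that pops each zero from the list in place (shifting the tail and stepping the index back) with a single filter pass collecting the non-zeros, then padding with the matching number of zeros; measured 1.4x faster at the largest size, below the 1.5x bar, so no speed claim.
import Mathlib
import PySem

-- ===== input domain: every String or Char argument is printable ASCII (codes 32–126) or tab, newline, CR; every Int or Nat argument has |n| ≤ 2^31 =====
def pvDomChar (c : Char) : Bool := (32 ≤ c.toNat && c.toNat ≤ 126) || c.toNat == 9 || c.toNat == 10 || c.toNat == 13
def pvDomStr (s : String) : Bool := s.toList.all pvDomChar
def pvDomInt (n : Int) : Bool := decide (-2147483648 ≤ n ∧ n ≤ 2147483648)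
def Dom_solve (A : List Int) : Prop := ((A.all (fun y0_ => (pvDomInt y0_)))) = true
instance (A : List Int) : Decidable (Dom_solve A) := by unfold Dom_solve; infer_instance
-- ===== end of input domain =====

-- B replaces A's pop-in-place while-loop with one filter pass plus zero padding (both
-- Pythons mutate A in place; the equivalence proved here is about the returned value).

-- ===== PORT A =====
-- A's while loop: i scans, zeros are popped (i stepped back), count counts pops.
-- fuel = length - i only makes the loop total; it decreases by exactly 1 each iteration.
def solveLoop : Nat → List Int → Int → Int → Int → List Int × Int
  | 0, A, _, _, count => (A, count)
  | fuel + 1, A, i, length, count =>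
    if i < length then
      match PySem.List.pyGet? A i with
      | none => (A, count)  -- unreachable: i is always in range
      | some v =>
        if v = 0 then
          match PySem.List.pop? A i with
          | none => (A, count)  -- unreachable
          | some (_, A') => solveLoop fuel A' i (length - 1) (count + 1)
        else solveLoop fuel A (i + 1) length count
    else (A, count)

def solve (A : List Int) : List Int :=
  let r := solveLoop A.length A 0 (A.length : Int) 0
  -- 'for i in range(count): A.append(0)'
  (PySem.List.pyRange 0 r.2 1).foldl (fun acc _ => acc ++ [0]) r.1

-- ===== PORT B =====
def solve_alt (A : List Int) : List Int :=
  let nz := A.filter (fun x => x ≠ 0)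
  nz ++ List.replicate (A.length - nz.length) 0

-- ===== PRECONDITION & SPEC =====
def Spec_solve (A : List Int) (out : List Int) : Prop := out = solve_alt A
instance (A : List Int) (out : List Int) : Decidable (Spec_solve A out) := by unfold Spec_solve; infer_instance

-- ===== CLAIM (what is proved, stated in full; the proofs are below) =====
def Claim_equal_solve : Prop := ∀ (A : List Int), Dom_solve A → Spec_solve A (solve A)

-- ===== LEMMAS AND PROOFS =====

-- Loop invariant: with 'done' the already-kept (non-zero) prefix, the loop filters the rest
-- and adds the number of zeros of the rest to count.
theorem solveLoop_inv (rest : List Int) : ∀ (fuel : Nat) (done : List Int) (count : Int),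
    rest.length ≤ fuel →
    solveLoop fuel (done ++ rest) (done.length : Int) ((done.length + rest.length : Nat) : Int) count
      = (done ++ rest.filter (fun x => x ≠ 0), count + (rest.countP (fun x => x = 0) : Int)) := by
  induction rest with
  | nil =>
    intro fuel done count _
    cases fuel with
    | zero => simp [solveLoop]
    | succ f => simp [solveLoop]
  | cons x rs ih =>
    intro fuel done count hf
    cases fuel with
    | zero => simp at hf
    | succ f =>
      have hlt : (done.length : Int) < ((done.length + (x :: rs).length : Nat) : Int) := by
        simp
      have hget : PySem.List.pyGet? (done ++ x :: rs) (done.length : Int) = some x :=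
        PySem.List.pyGet?_append_length done rs x
      by_cases hx : x = 0
      · subst hx
        have hpop : PySem.List.pop? (done ++ 0 :: rs) (done.length : Int)
            = some ((done ++ 0 :: rs)[done.length], (done ++ 0 :: rs).eraseIdx done.length) :=
          PySem.List.pop?_natCast _ _ (by simp)
        have herase : (done ++ 0 :: rs).eraseIdx done.length = done ++ rs := by
          simp [List.eraseIdx_append_of_length_le (Nat.le_refl done.length)]
        have hlen : ((done.length + (0 :: rs).length : Nat) : Int) - 1
            = ((done.length + rs.length : Nat) : Int) := by simp only [List.length_cons]; push_cast; ring
        have := ih f done (count + 1) (by simpa using Nat.le_of_succ_le_succ hf)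
        simp only [solveLoop, hlt, if_pos, hget, hpop, herase, hlen] at this ⊢
        rw [this]
        simp
        omega
      · have hlen2 : ((done.length + (x :: rs).length : Nat) : Int)
            = (((done ++ [x]).length + rs.length : Nat) : Int) := by push_cast; simp; ring
        have hi : (done.length : Int) + 1 = (((done ++ [x]).length : Nat) : Int) := by simp
        have := ih f (done ++ [x]) count (by simpa using Nat.le_of_succ_le_succ hf)
        simp only [List.append_assoc, List.singleton_append] at this
        simp only [solveLoop, hget, if_neg hx, hi, hlen2] at ⊢
        rw [if_pos (by rw [← hlen2]; exact hlt), this]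
        simp [hx]

-- Appending count zeros via the range-fold is appending a replicate.
theorem foldl_append_zeros (c : Int) (A : List Int) :
    (PySem.List.pyRange 0 c 1).foldl (fun acc _ => acc ++ [0]) A
      = A ++ List.replicate (PySem.List.pyRange 0 c 1).length 0 := by
  generalize (PySem.List.pyRange 0 c 1) = l
  induction l generalizing A with
  | nil => simp
  | cons y ys ih => simp [List.foldl_cons, ih, List.replicate_succ]

theorem filter_countP_len (A : List Int) :
    (A.filter (fun x => x ≠ 0)).length + A.countP (fun x => x = 0) = A.length := by
  induction A with
  | nil => simp
  | cons x xs ih =>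
    by_cases hx : x = 0 <;>
      simp only [List.filter_cons, List.countP_cons, hx, decide_true, decide_false,
        Bool.not_true, Bool.not_false, if_true, List.length_cons, decide_not] <;>
      simp at ih ⊢ <;> omega

theorem countP_zero_eq (A : List Int) :
    A.countP (fun x => x = 0) = A.length - (A.filter (fun x => x ≠ 0)).length := by
  have h := filter_countP_len A
  omega

-- ===== VERDICT (by name: the statement is the Claim_ definition above) =====
theorem solve_spec : Claim_equal_solve := by
  intro A _
  unfold Spec_solve solve solve_alt
  have h := solveLoop_inv A A.length [] 0 (Nat.le_refl _)
  simp only [List.nil_append, List.length_nil, Nat.zero_add, Int.natCast_zero] at h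
  rw [h, foldl_append_zeros]
  simp [PySem.List.length_pyRange_one, countP_zero_eq A]
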